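-- pv_equiv track=rewrite | github.com/feadoor/gcj | 2018/1a/waffle_choppers.py | exist_vertical_cuts
-- ===== SOURCE A (Python) =====
-- def get_total_chips(waffle):
--     return sum(sum(row) for row in waffle)
--
-- def get_sections(waffle, horizontal_cuts):
--     sections, tracker = [], 0
--     for cut in horizontal_cuts:
--         sections.append(waffle[tracker : cut + 1])
--         tracker = cut + 1
--     sections.append(waffle[tracker:])
--     return sections
--
-- def exist_vertical_cuts(waffle, horizontal_cuts, required_cuts):
--
--     waffle_sections = get_sections(waffle, horizontal_cuts)
--
--     total_chips = get_total_chips(waffle_sections[0])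
--     if total_chips % (required_cuts + 1) == 0:
--         per_section = total_chips // (required_cuts + 1)
--     else:
--         return False
--
--     cuts, current_chips, next_target = [], [0 for section in waffle_sections], per_section
--     for idx in range(len(waffle[0])):
--         for jdx, section in enumerate(waffle_sections):
--             current_chips[jdx] += sum(x[idx] for x in section)
--         if all(x == next_target for x in current_chips):
--             cuts.append(idx)
--             next_target += per_section
--
--     if len(cuts) < required_cuts:
--         return False
--     else:
--         return True
-- ===== SOURCE B (Python) =====
-- def exist_vertical_cuts(waffle, horizontal_cuts, required_cuts):
--     # Horizontal sections, by the same slice boundaries.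
--     sections, start = [], 0
--     for cut in horizontal_cuts:
--         sections.append(waffle[start : cut + 1])
--         start = cut + 1
--     sections.append(waffle[start:])
--
--     total = sum(sum(row) for row in sections[0])
--     if total % (required_cuts + 1) != 0:
--         return False
--     per_section = total // (required_cuts + 1)
--
--     width = len(waffle[0])
--     # Per-section column totals (rows folded element-wise), then prefix sums.
--     prefix = []
--     for section in sections:
--         cols = [0] * width
--         for row in section:
--             cols = [c + x for c, x in zip(cols, row)]
--         acc, pre = 0, []
--         for c in cols:
--             acc += c
--             pre.append(acc)
--         prefix.append(pre)
--
--     # Scan the columns once with an integer counter against the moving target.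
--     found, target = 0, per_section
--     for i in range(width):
--         if all(p[i] == target for p in prefix):
--             found += 1
--             target += per_section
--     return found >= required_cuts
-- ===== Notes on version B (the rewrite author's own statement) =====
-- stated objective: alternative
-- what changed: A interleaves everything in one column pass that mutates a running per-section chip counter and collects cut indices in a list; B first builds a per-section column-prefix-sum table (folding rows element-wise with zip, then prefix-summing), and only then scans columns with a plain integer counter against the moving target.
-- outside the precondition, e.g. on exist_vertical_cuts([[1, 2], [3]], [], 4): A returns False, B returns False
import Mathlib
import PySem

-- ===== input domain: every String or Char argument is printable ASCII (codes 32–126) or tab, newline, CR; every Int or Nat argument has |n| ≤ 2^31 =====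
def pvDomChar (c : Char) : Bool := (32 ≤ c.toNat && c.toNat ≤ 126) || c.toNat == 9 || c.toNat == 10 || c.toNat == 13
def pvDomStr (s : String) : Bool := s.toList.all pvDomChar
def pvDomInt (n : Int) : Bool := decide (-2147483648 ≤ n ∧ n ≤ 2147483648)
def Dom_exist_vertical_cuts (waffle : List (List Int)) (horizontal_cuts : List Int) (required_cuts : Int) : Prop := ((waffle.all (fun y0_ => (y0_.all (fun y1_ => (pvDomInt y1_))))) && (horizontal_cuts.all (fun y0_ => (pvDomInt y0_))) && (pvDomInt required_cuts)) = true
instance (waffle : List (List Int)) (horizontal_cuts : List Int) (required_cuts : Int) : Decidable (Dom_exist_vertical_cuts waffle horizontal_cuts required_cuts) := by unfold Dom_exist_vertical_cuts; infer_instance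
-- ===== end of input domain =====

-- B replaces A's single interleaved column pass (mutable per-section chip counters + a list
-- of cut indices) by a precomputed per-section column-prefix-sum table followed by a counting
-- scan; same cost, different decomposition (objective: alternative).


-- ===== PORT A =====
def pvGetTotalChips (waffle : List (List Int)) : Int :=
  (waffle.map (fun row => row.sum)).sum

def pvGetSections (waffle : List (List Int)) (horizontal_cuts : List Int) : List (List (List Int)) :=
  let st := horizontal_cuts.foldl
    (fun (st : List (List (List Int)) × Int) cut =>
      (st.1 ++ [PySem.List.slice waffle (some st.2) (some (cut + 1))], cut + 1))
    ([], 0)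
  st.1 ++ [PySem.List.slice waffle (some st.2) none]

def exist_vertical_cuts (waffle : List (List Int)) (horizontal_cuts : List Int) (required_cuts : Int) : Bool :=
  let waffle_sections := pvGetSections waffle horizontal_cuts
  let total_chips := pvGetTotalChips (PySem.List.pyGetD waffle_sections 0 [])
  if PySem.Int.mod total_chips (required_cuts + 1) == 0 then
    let per_section := PySem.Int.floordiv total_chips (required_cuts + 1)
    -- the 'for jdx, section in enumerate(...): current_chips[jdx] += ...' indexed in-place
    -- update is the element-wise zipWith of current_chips with waffle_sections
    let st := (PySem.List.pyRange 0 ((PySem.List.pyGetD waffle 0 []).length : Int) 1).foldl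
      (fun (st : List Int × List Int × Int) idx =>
        let current_chips := List.zipWith
          (fun c sec => c + (sec.map (fun x => PySem.List.pyGetD x idx 0)).sum)
          st.2.1 (pvGetSections waffle horizontal_cuts)
        if current_chips.all (fun x => x == st.2.2) then
          (st.1 ++ [idx], current_chips, st.2.2 + per_section)
        else (st.1, current_chips, st.2.2))
      ([], (pvGetSections waffle horizontal_cuts).map (fun _ => (0 : Int)), per_section)
    if (st.1.length : Int) < required_cuts then false else true
  else false

-- ===== PORT B =====
def exist_vertical_cuts_alt (waffle : List (List Int)) (horizontal_cuts : List Int) (required_cuts : Int) : Bool :=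
  let st := horizontal_cuts.foldl
    (fun (st : List (List (List Int)) × Int) cut =>
      (st.1 ++ [PySem.List.slice waffle (some st.2) (some (cut + 1))], cut + 1))
    ([], 0)
  let sections := st.1 ++ [PySem.List.slice waffle (some st.2) none]
  let total := ((PySem.List.pyGetD sections 0 []).map (fun row => row.sum)).sum
  if PySem.Int.mod total (required_cuts + 1) != 0 then false
  else
    let per_section := PySem.Int.floordiv total (required_cuts + 1)
    let width := ((PySem.List.pyGetD waffle 0 []).length : Int)
    let pfx := sections.foldl
      (fun (pf : List (List Int)) sec =>
        let cols := sec.foldl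
          (fun cols row => List.zipWith (fun c x => c + x) cols row)
          (PySem.List.pyRepeat [(0 : Int)] width)
        let pre := cols.foldl (fun (st : Int × List Int) c => (st.1 + c, st.2 ++ [st.1 + c])) (0, [])
        pf ++ [pre.2]) []
    let st2 := (PySem.List.pyRange 0 width 1).foldl
      (fun (st : Int × Int) i =>
        if pfx.all (fun p => PySem.List.pyGetD p i 0 == st.2) then (st.1 + 1, st.2 + per_section)
        else st) (0, per_section)
    decide (required_cuts ≤ st2.1)

-- ===== PRECONDITION & SPEC =====
-- Pre_ excludes inputs where A raises (empty waffle: IndexError on waffle[0]; required_cuts = -1: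
-- ZeroDivisionError; a row shorter than the first row: IndexError on x[idx]); for simplicity of the
-- closed form it also excludes such ragged/empty grids when A's divisibility guard happens to fail
-- first, where A returns False before indexing — B returns False there too.
def Pre_exist_vertical_cuts (waffle : List (List Int)) (horizontal_cuts : List Int) (required_cuts : Int) : Prop :=
  waffle ≠ [] ∧ required_cuts + 1 ≠ 0 ∧ ∀ row ∈ waffle, (waffle.headD []).length ≤ row.length
instance (waffle : List (List Int)) (horizontal_cuts : List Int) (required_cuts : Int) : Decidable (Pre_exist_vertical_cuts waffle horizontal_cuts required_cuts) := by unfold Pre_exist_vertical_cuts; infer_instance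
def pvWitness_exist_vertical_cuts : List (List Int) × List Int × Int := ([[1, 1], [1, 1]], [0], 1)

def Spec_exist_vertical_cuts (waffle : List (List Int)) (horizontal_cuts : List Int) (required_cuts : Int) (out : Bool) : Prop := out = exist_vertical_cuts_alt waffle horizontal_cuts required_cuts
instance (waffle : List (List Int)) (horizontal_cuts : List Int) (required_cuts : Int) (out : Bool) : Decidable (Spec_exist_vertical_cuts waffle horizontal_cuts required_cuts out) := by unfold Spec_exist_vertical_cuts; infer_instance

-- ===== CLAIM (what is proved, stated in full; the proofs are below) =====
def Claim_equal_exist_vertical_cuts : Prop := ∀ (waffle : List (List Int)) (horizontal_cuts : List Int) (required_cuts : Int), Dom_exist_vertical_cuts waffle horizontal_cuts required_cuts → Pre_exist_vertical_cuts waffle horizontal_cuts required_cuts → Spec_exist_vertical_cuts waffle horizontal_cuts required_cuts (exist_vertical_cuts waffle horizontal_cuts required_cuts)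

-- ===== LEMMAS AND PROOFS =====

-- column sum of a section at column j, and its prefix over the first n columns
def pvColsum (sec : List (List Int)) (j : Nat) : Int := (sec.map (fun x => x.getD j 0)).sum
def pvPref (sec : List (List Int)) (n : Nat) : Int := ((List.range n).map (pvColsum sec)).sum

lemma pvPref_zero (sec : List (List Int)) : pvPref sec 0 = 0 := by simp [pvPref]

lemma pv_fold_sections (waffle : List (List Int)) :
    ∀ (hc : List Int) (acc : List (List (List Int))) (t : Int),
    (∀ sec ∈ acc, ∀ row ∈ sec, row ∈ waffle) →
    ∀ sec ∈ (hc.foldl (fun (st : List (List (List Int)) × Int) cut =>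
        (st.1 ++ [PySem.List.slice waffle (some st.2) (some (cut + 1))], cut + 1)) (acc, t)).1,
    ∀ row ∈ sec, row ∈ waffle := by
  intro hc
  induction hc with
  | nil => intro acc t hacc sec hsec; exact hacc sec hsec
  | cons c hc ih =>
    intro acc t hacc sec hsec
    refine ih _ _ ?_ sec hsec
    intro s hs row hrow
    rcases List.mem_append.mp hs with h | h
    · exact hacc s h row hrow
    · simp at h; subst h; exact PySem.List.mem_of_mem_slice _ _ _ hrow

lemma pv_sections_rows (waffle : List (List Int)) (hc : List Int) :
    ∀ sec ∈ pvGetSections waffle hc, ∀ row ∈ sec, row ∈ waffle := by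
  intro sec hsec row hrow
  unfold pvGetSections at hsec
  rcases List.mem_append.mp hsec with h | h
  · exact pv_fold_sections waffle hc [] 0 (by simp) sec h row hrow
  · simp at h; subst h
    exact PySem.List.mem_of_mem_slice _ _ _ hrow

lemma pv_getD_range_self (init : List Int) :
    (List.range init.length).map (fun j => init.getD j 0) = init := by
  apply List.ext_getElem
  · simp
  · intro i h1 h2
    simp [List.getD_eq_getElem?_getD, List.getElem?_eq_getElem h2]

lemma pv_cols_fold (w : Nat) (sec : List (List Int))
    (h : ∀ row ∈ sec, w ≤ row.length) :
    ∀ init : List Int, init.length = w →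
    sec.foldl (fun cols row => List.zipWith (fun c x => c + x) cols row) init
      = (List.range w).map (fun j => init.getD j 0 + pvColsum sec j) := by
  induction sec with
  | nil =>
    intro init hinit
    subst hinit
    simpa [pvColsum] using (pv_getD_range_self init).symm
  | cons r sec ih =>
    intro init hinit
    have hr : w ≤ r.length := h r (by simp)
    have hlen : (List.zipWith (fun c x => c + x) init r).length = w := by
      simp [List.length_zipWith, hinit]; omega
    rw [List.foldl_cons, ih (fun row hrow => h row (by simp [hrow])) _ hlen]
    apply List.map_congr_left
    intro j hj
    have hjw : j < w := List.mem_range.mp hj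
    have h1 : (List.zipWith (fun c x : Int => c + x) init r).getD j 0 = init.getD j 0 + r.getD j 0 := by
      rw [List.getD_eq_getElem _ _ (by omega), List.getElem_zipWith,
          List.getD_eq_getElem _ _ (by omega), List.getD_eq_getElem _ _ (by omega)]
    rw [h1]
    simp [pvColsum]
    ring

lemma pv_presum_fold :
    ∀ (cols : List Int) (a : Int) (acc : List Int),
    (cols.foldl (fun (st : Int × List Int) c => (st.1 + c, st.2 ++ [st.1 + c])) (a, acc)).2
      = acc ++ (List.range cols.length).map (fun j => a + ((cols.take (j + 1)).sum)) := by
  intro cols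
  induction cols with
  | nil => simp
  | cons c cols ih =>
    intro a acc
    rw [List.foldl_cons]
    show (cols.foldl _ (a + c, acc ++ [a + c])).2 = _
    rw [ih]
    rw [List.length_cons, List.range_succ_eq_map]
    simp [List.map_map, Function.comp, add_assoc]

lemma pvPref_succ' (sec : List (List Int)) (n : Nat) :
    pvPref sec (n + 1) = pvPref sec n + pvColsum sec n := by
  simp [pvPref, List.range_succ]

lemma pv_prefix_table (waffle : List (List Int)) (hc : List Int) (w : Nat)
    (hrows : ∀ sec ∈ pvGetSections waffle hc, ∀ row ∈ sec, w ≤ row.length) :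
    (pvGetSections waffle hc).foldl
      (fun (pf : List (List Int)) sec =>
        pf ++ [(((sec.foldl (fun cols row => List.zipWith (fun c x => c + x) cols row)
            (PySem.List.pyRepeat [(0 : Int)] (w : Int))).foldl
          (fun (st : Int × List Int) c => (st.1 + c, st.2 ++ [st.1 + c])) (0, [])).2)]) []
      = (pvGetSections waffle hc).map (fun sec => (List.range w).map (fun j => pvPref sec (j + 1))) := by
  rw [PySem.List.foldl_append_singleton_eq_map]
  simp only [List.nil_append]
  apply List.map_congr_left
  intro sec hsec
  have hrep : (PySem.List.pyRepeat [(0 : Int)] (w : Int)) = List.replicate w 0 := by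
    rw [PySem.List.pyRepeat_singleton]; simp
  rw [hrep, pv_cols_fold w sec (hrows sec hsec) _ (by simp), pv_presum_fold]
  simp only [List.length_map, List.length_range, List.nil_append]
  apply List.map_congr_left
  intro j hj
  have hjw : j < w := List.mem_range.mp hj
  rw [← List.map_take, List.take_range]
  have : min (j+1) w = j + 1 := by omega
  rw [this]
  simp only [pvPref, zero_add]
  congr 1
  apply List.map_congr_left
  intro k hk
  simp [pvColsum]

lemma pv_zipWith_map_self {α β : Type} (f : β → α → β) (g : α → β) (l : List α) :
    List.zipWith f (l.map g) l = l.map (fun x => f (g x) x) := by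
  induction l with
  | nil => rfl
  | cons x l ih => simp [ih]

lemma pv_all_congr {α : Type} (l : List α) (p q : α → Bool)
    (h : ∀ x ∈ l, p x = q x) : l.all p = l.all q := by
  induction l with
  | nil => rfl
  | cons x l ih => simp [List.all_cons, h x (by simp), ih (fun y hy => h y (by simp [hy]))]

lemma pv_loop_sync (S : List (List (List Int))) (per : Int) (w : Nat) :
    ∀ (n i : Nat) (cuts : List Int) (t : Int), i + n = w →
    (((PySem.List.pyRange (i : Int) (w : Int) 1).foldl
        (fun (st : List Int × List Int × Int) idx =>
          if (List.zipWith (fun c sec => c + (sec.map (fun x => PySem.List.pyGetD x idx 0)).sum)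
                st.2.1 S).all (fun x => x == st.2.2) then
            (st.1 ++ [idx], List.zipWith (fun c sec => c + (sec.map (fun x => PySem.List.pyGetD x idx 0)).sum) st.2.1 S, st.2.2 + per)
          else (st.1, List.zipWith (fun c sec => c + (sec.map (fun x => PySem.List.pyGetD x idx 0)).sum) st.2.1 S, st.2.2))
        (cuts, S.map (fun sec => pvPref sec i), t)).1.length : Int)
      = ((PySem.List.pyRange (i : Int) (w : Int) 1).foldl
          (fun (st : Int × Int) idx =>
            if (S.map (fun sec => (List.range w).map (fun j => pvPref sec (j + 1)))).all
                 (fun p => PySem.List.pyGetD p idx 0 == st.2) then (st.1 + 1, st.2 + per)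
            else st)
          ((cuts.length : Int), t)).1 := by
  intro n
  induction n with
  | zero =>
    intro i cuts t hi
    rw [PySem.List.pyRange_one_eq_nil (by exact_mod_cast (by omega : (w:Nat) ≤ i))]
    simp
  | succ n ih =>
    intro i cuts t hi
    have hiw : (i : Int) < (w : Int) := by exact_mod_cast (by omega : i < w)
    rw [PySem.List.pyRange_one_cons hiw, List.foldl_cons, List.foldl_cons]
    have hchips : List.zipWith (fun c sec => c + (sec.map (fun x => PySem.List.pyGetD x (i : Int) 0)).sum)
        (S.map (fun sec => pvPref sec i)) S = S.map (fun sec => pvPref sec (i + 1)) := by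
      rw [pv_zipWith_map_self]
      apply List.map_congr_left
      intro sec _
      rw [pvPref_succ']
      congr 1
      simp [pvColsum, List.getD_eq_getElem?_getD]
    have hcond : (S.map (fun sec => (List.range w).map (fun j => pvPref sec (j + 1)))).all
          (fun p => PySem.List.pyGetD p (i : Int) 0 == t)
        = (S.map (fun sec => pvPref sec (i + 1))).all (fun x => x == t) := by
      rw [List.all_map, List.all_map]
      apply pv_all_congr
      intro sec _
      have : PySem.List.pyGetD ((List.range w).map (fun j => pvPref sec (j + 1))) (i : Int) 0
          = pvPref sec (i + 1) := by
        rw [PySem.List.pyGetD_natCast, List.getD_eq_getElem _ _ (by simp; omega)]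
        simp
      simp only [Function.comp_apply, this]
    simp only [hchips, hcond]
    have hcast : ((i : Int) + 1) = ((i + 1 : Nat) : Int) := by push_cast; ring
    cases hc : (S.map (fun sec => pvPref sec (i + 1))).all (fun x => x == t) with
    | false =>
      rw [if_neg (by simp)]
      rw [hcast]
      exact ih (i + 1) cuts t (by omega)
    | true =>
      rw [if_pos rfl]
      rw [hcast]
      have := ih (i + 1) (cuts ++ [(i : Int)]) (t + per) (by omega)
      simpa using this

-- B with the shared section builder named (definitional repackaging of the alt port)
lemma pv_alt_eq (waffle : List (List Int)) (hc : List Int) (rc : Int) :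
    exist_vertical_cuts_alt waffle hc rc =
      (if PySem.Int.mod ((PySem.List.pyGetD (pvGetSections waffle hc) 0 []).map (fun row => row.sum)).sum (rc + 1) != 0 then false
       else
        decide (rc ≤ ((PySem.List.pyRange 0 ((PySem.List.pyGetD waffle 0 []).length : Int) 1).foldl
          (fun (st : Int × Int) i =>
            if ((pvGetSections waffle hc).foldl
                (fun (pf : List (List Int)) sec =>
                  pf ++ [((sec.foldl (fun cols row => List.zipWith (fun c x => c + x) cols row)
                      (PySem.List.pyRepeat [(0 : Int)] ((PySem.List.pyGetD waffle 0 []).length : Int))).foldl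
                    (fun (st : Int × List Int) c => (st.1 + c, st.2 ++ [st.1 + c])) (0, [])).2]) []).all
                 (fun p => PySem.List.pyGetD p i 0 == st.2) then
              (st.1 + 1, st.2 + PySem.Int.floordiv ((PySem.List.pyGetD (pvGetSections waffle hc) 0 []).map (fun row => row.sum)).sum (rc + 1))
            else st)
          (0, PySem.Int.floordiv ((PySem.List.pyGetD (pvGetSections waffle hc) 0 []).map (fun row => row.sum)).sum (rc + 1))).1)) := rfl

-- ===== VERDICT (by name: the statement is the Claim_ definition above) =====
theorem exist_vertical_cuts_spec : Claim_equal_exist_vertical_cuts := by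
  intro waffle hc rc _ hpre
  obtain ⟨hne, hrc, hrows⟩ := hpre
  unfold Spec_exist_vertical_cuts
  cases waffle with
  | nil => exact absurd rfl hne
  | cons r0 rest =>
  rw [pv_alt_eq]
  simp only [exist_vertical_cuts, pvGetTotalChips]
  have hW : PySem.List.pyGetD (r0 :: rest) 0 ([] : List Int) = r0 := by
    rw [PySem.List.pyGetD_zero]; rfl
  rw [hW]
  have hbne : ∀ a : Int, (a != 0) = !(a == 0) := fun _ => rfl
  rw [hbne]
  cases hmod : (PySem.Int.mod ((PySem.List.pyGetD (pvGetSections (r0 :: rest) hc) 0 []).map (fun row => row.sum)).sum (rc + 1) == 0) with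
  | false => simp
  | true =>
  simp only [Bool.not_true, Bool.false_eq_true, if_false, if_true]
  have hwrows : ∀ sec ∈ pvGetSections (r0 :: rest) hc, ∀ row ∈ sec, r0.length ≤ row.length := by
    intro sec hsec row hrow
    have := hrows row (pv_sections_rows _ _ sec hsec row hrow)
    simpa using this
  rw [pv_prefix_table (r0 :: rest) hc r0.length hwrows]
  have hinit : (pvGetSections (r0 :: rest) hc).map (fun _ => (0 : Int))
      = (pvGetSections (r0 :: rest) hc).map (fun sec => pvPref sec 0) := by
    apply List.map_congr_left; intro sec _; exact (pvPref_zero sec).symm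
  rw [hinit]
  have sync := pv_loop_sync (pvGetSections (r0 :: rest) hc)
    (PySem.Int.floordiv ((PySem.List.pyGetD (pvGetSections (r0 :: rest) hc) 0 []).map (fun row => row.sum)).sum (rc + 1))
    r0.length r0.length 0 []
    (PySem.Int.floordiv ((PySem.List.pyGetD (pvGetSections (r0 :: rest) hc) 0 []).map (fun row => row.sum)).sum (rc + 1))
    (by omega)
  simp only [List.length_nil, Nat.cast_zero] at sync
  rw [sync]
  by_cases hle : rc ≤ ((PySem.List.pyRange 0 (r0.length : Int) 1).foldl
      (fun (st : Int × Int) idx =>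
        if ((pvGetSections (r0 :: rest) hc).map (fun sec => (List.range r0.length).map (fun j => pvPref sec (j + 1)))).all
             (fun p => PySem.List.pyGetD p idx 0 == st.2) then
          (st.1 + 1, st.2 + PySem.Int.floordiv ((PySem.List.pyGetD (pvGetSections (r0 :: rest) hc) 0 []).map (fun row => row.sum)).sum (rc + 1))
        else st)
      (0, PySem.Int.floordiv ((PySem.List.pyGetD (pvGetSections (r0 :: rest) hc) 0 []).map (fun row => row.sum)).sum (rc + 1))).1
  · rw [if_neg (by omega), decide_eq_true hle]
  · rw [if_pos (by omega)]
    symm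
    simpa using hle
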